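-- pv_equiv track=rewrite | github.com/ForestR/NeuroEntropy | experiments/utils/evaluate.py | create_simple_test_set
-- ===== SOURCE A (Python) =====
-- from typing import Dict, List, Optional
--
-- def create_simple_test_set(num_examples: int = 100) -> List[str]:
--     """
--     Create a simple test set for evaluation.
--
--     Args:
--         num_examples: Number of examples to generate
--
--     Returns:
--         texts: List of test texts
--     """
--     # Simple test texts (in practice, would use a real dataset)
--     base_texts = [
--         "The quick brown fox jumps over the lazy dog.",
--         "In a hole in the ground there lived a hobbit.",
--         "It was the best of times, it was the worst of times.",
--         "To be or not to be, that is the question.",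
--         "The answer to the ultimate question of life, the universe, and everything is 42.",
--     ]
--
--     # Repeat and vary
--     texts = []
--     for i in range(num_examples):
--         base_text = base_texts[i % len(base_texts)]
--         texts.append(base_text)
--
--     return texts
-- ===== SOURCE B (Python) =====
-- from typing import Dict, List, Optional
--
-- def create_simple_test_set(num_examples: int = 100) -> List[str]:
--     """Create a simple test set: base texts repeated cyclically, built in bulk."""
--     base_texts = [
--         "The quick brown fox jumps over the lazy dog.",
--         "In a hole in the ground there lived a hobbit.",
--         "It was the best of times, it was the worst of times.",
--         "To be or not to be, that is the question.",
--         "The answer to the ultimate question of life, the universe, and everything is 42.",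
--     ]
--     q, r = divmod(max(num_examples, 0), len(base_texts))
--     return base_texts * q + base_texts[:r]
-- ===== Notes on version B (the rewrite author's own statement) =====
-- stated objective: simpler
-- what changed: Replaces the n-iteration loop with per-element modulo indexing by a single divmod and bulk list-repeat plus a remainder slice (clamping negative counts to zero, matching range's empty result).
import Mathlib
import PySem

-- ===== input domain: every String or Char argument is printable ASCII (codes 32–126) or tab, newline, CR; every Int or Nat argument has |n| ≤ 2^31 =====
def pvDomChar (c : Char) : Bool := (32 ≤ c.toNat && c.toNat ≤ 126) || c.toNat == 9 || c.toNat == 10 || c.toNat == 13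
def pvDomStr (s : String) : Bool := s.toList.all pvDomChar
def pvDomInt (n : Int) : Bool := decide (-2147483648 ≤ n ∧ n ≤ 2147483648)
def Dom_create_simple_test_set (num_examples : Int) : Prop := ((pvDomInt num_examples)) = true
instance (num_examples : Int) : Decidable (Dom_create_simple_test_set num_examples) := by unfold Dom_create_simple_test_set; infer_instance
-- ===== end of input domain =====

-- B replaces A's per-element loop (index i % len each iteration) by one divmod and a
-- bulk repeat-plus-remainder-slice construction; same return value for every int input.

-- The five base texts (the same literal list both Pythons define locally).
def pvBaseTexts : List String :=
  [ "The quick brown fox jumps over the lazy dog.",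
    "In a hole in the ground there lived a hobbit.",
    "It was the best of times, it was the worst of times.",
    "To be or not to be, that is the question.",
    "The answer to the ultimate question of life, the universe, and everything is 42." ]

-- ===== PORT A =====
-- for i in range(num_examples): texts.append(base_texts[i % len(base_texts)])
-- (the index i % 5 is always in range, so pyGetD's default is never used)
def create_simple_test_set (num_examples : Int) : List String :=
  (PySem.List.pyRange 0 num_examples 1).foldl
    (fun texts i =>
      texts ++ [PySem.List.pyGetD pvBaseTexts (PySem.Int.mod i (pvBaseTexts.length : Int)) ""])
    []

-- ===== PORT B =====
-- q, r = divmod(max(num_examples, 0), len(base_texts)); return base_texts * q + base_texts[:r]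
def create_simple_test_set_alt (num_examples : Int) : List String :=
  let n := max num_examples 0
  let q := PySem.Int.floordiv n (pvBaseTexts.length : Int)
  let r := PySem.Int.mod n (pvBaseTexts.length : Int)
  (List.replicate q.toNat pvBaseTexts).flatten ++ PySem.List.slice pvBaseTexts none (some r)

-- ===== PRECONDITION & SPEC =====
def Spec_create_simple_test_set (num_examples : Int) (out : List String) : Prop := out = create_simple_test_set_alt num_examples
instance (num_examples : Int) (out : List String) : Decidable (Spec_create_simple_test_set num_examples out) := by unfold Spec_create_simple_test_set; infer_instance

-- ===== CLAIM (what is proved, stated in full; the proofs are below) =====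
def Claim_equal_create_simple_test_set : Prop := ∀ (num_examples : Int), Dom_create_simple_test_set num_examples → Spec_create_simple_test_set num_examples (create_simple_test_set num_examples)

-- ===== LEMMAS AND PROOFS =====

-- One full period of the cyclic indexing is exactly xs.
lemma map_mod_range_len {α : Type} (xs : List α) (d : α) :
    (List.range xs.length).map (fun k => xs.getD (k % xs.length) d) = xs := by
  apply List.ext_getElem
  · simp
  · intro k h1 h2
    simp only [List.getElem_map, List.getElem_range]
    have hk : k < xs.length := by simpa using h2
    rw [Nat.mod_eq_of_lt hk, List.getD_eq_getElem xs d hk]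

-- Cyclic-index map over range n  =  whole copies ++ remainder prefix.
lemma cyclic_map_eq {α : Type} (xs : List α) (d : α) (hL : xs ≠ []) (n : Nat) :
    (List.range n).map (fun k => xs.getD (k % xs.length) d)
      = (List.replicate (n / xs.length) xs).flatten ++ xs.take (n % xs.length) := by
  induction n using Nat.strong_induction_on with
  | _ n ih =>
    have hL0 : 0 < xs.length := List.length_pos_iff.mpr hL
    by_cases hn : n < xs.length
    · rw [Nat.div_eq_of_lt hn, Nat.mod_eq_of_lt hn]
      simp only [List.replicate_zero, List.flatten_nil, List.nil_append]
      apply List.ext_getElem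
      · simp [Nat.le_of_lt hn]
      · intro k h1 h2
        simp only [List.getElem_map, List.getElem_range, List.getElem_take]
        have hk : k < n := by simpa using h1
        rw [Nat.mod_eq_of_lt (lt_trans hk hn), List.getD_eq_getElem xs d (lt_trans hk hn)]
    · push Not at hn
      obtain ⟨m, rfl⟩ : ∃ m, n = xs.length + m := ⟨n - xs.length, by omega⟩
      rw [List.range_add, List.map_append, List.map_map]
      have h1 : (List.range xs.length).map (fun k => xs.getD (k % xs.length) d) = xs :=
        map_mod_range_len xs d
      have h2 : ((List.range m).map ((fun k => xs.getD (k % xs.length) d) ∘ (xs.length + ·)))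
          = (List.range m).map (fun k => xs.getD (k % xs.length) d) := by
        apply List.map_congr_left
        intro k _
        simp [Function.comp, Nat.add_mod_left]
      rw [h1, h2, ih m (by omega)]
      have hdiv : (xs.length + m) / xs.length = m / xs.length + 1 := by
        rw [Nat.add_comm, Nat.add_div_right _ hL0]
      have hmod : (xs.length + m) % xs.length = m % xs.length := Nat.add_mod_left _ _
      rw [hdiv, hmod, List.replicate_succ, List.flatten_cons, List.append_assoc]

theorem create_simple_test_set_eq (num_examples : Int) :
    create_simple_test_set num_examples = create_simple_test_set_alt num_examples := by
  unfold create_simple_test_set create_simple_test_set_alt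
  by_cases h : num_examples ≤ 0
  · rw [PySem.List.pyRange_one_eq_nil h]
    have hmax : max num_examples 0 = 0 := by omega
    simp [hmax, PySem.Int.floordiv, PySem.Int.mod, PySem.List.slice_to]
  · push Not at h
    obtain ⟨n, rfl⟩ : ∃ n : Nat, num_examples = (n : Int) :=
      ⟨num_examples.toNat, (Int.toNat_of_nonneg (le_of_lt h)).symm⟩
    have hmax : max (n : Int) 0 = (n : Int) := by omega
    rw [PySem.List.foldl_append_singleton_eq_map, PySem.List.pyRange_one, hmax]
    simp only [sub_zero, Int.toNat_natCast, List.map_map]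
    have hlen : (pvBaseTexts.length : Int) = ((pvBaseTexts.length : Nat) : Int) := rfl
    have hm : ∀ k ∈ List.range n,
        ((fun i => PySem.List.pyGetD pvBaseTexts (PySem.Int.mod i (pvBaseTexts.length : Int)) "")
          ∘ (fun k : Nat => (0 : Int) + k)) k
        = pvBaseTexts.getD (k % pvBaseTexts.length) "" := by
      intro k _
      simp only [Function.comp, zero_add]
      rw [hlen, PySem.Int.mod_natCast, PySem.List.pyGetD_natCast]
    have hpos : (0:Int) < (pvBaseTexts.length : Int) := by decide
    rw [List.map_congr_left hm, cyclic_map_eq pvBaseTexts "" (by decide) n,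
        PySem.List.slice_to _ (PySem.Int.mod_nonneg _ hpos),
        PySem.Int.floordiv_eq_ediv_of_pos hpos, PySem.Int.mod_eq_emod_of_pos hpos]
    have e1 : ((n : Int) / (pvBaseTexts.length : Int)).toNat = n / pvBaseTexts.length := by
      rw [← Int.natCast_div, Int.toNat_natCast]
    have e2 : ((n : Int) % (pvBaseTexts.length : Int)).toNat = n % pvBaseTexts.length := by
      rw [← Int.natCast_mod, Int.toNat_natCast]
    rw [e1, e2, List.nil_append]

-- ===== VERDICT (by name: the statement is the Claim_ definition above) =====
theorem create_simple_test_set_spec : Claim_equal_create_simple_test_set := by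
  intro num_examples _
  exact create_simple_test_set_eq num_examples
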